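-- pv_equiv track=rewrite | github.com/uvsq22101259/IN_200N | jouer_avec_les_mots.py | compare_mots
-- ===== SOURCE A (Python) =====
-- def compare_mots(m1,m2):
--     if len(m1) != len(m2):
--         return
--     m1l = list(m1)
--     m2l = list(m2)
--     m2l_c = list(m2)
--     profil = [0]* len(m1)
--     exclu = []
--
--     for i in range (len(m1l)):
--         if m1l[i] ==  m2l[i]:
--             profil[i] = 1
--         elif m1l[i] in m2l_c:
--             m2l_c.remove(m1l[i])
--             profil[i] = 2
--         else :
--             profil[i] = 0
--     return profil
-- ===== SOURCE B (Python) =====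
-- def compare_mots(m1, m2):
--     if len(m1) != len(m2):
--         return None
--     def code(i):
--         c = m1[i]
--         if c == m2[i]:
--             return 1
--         rank = sum(1 for j in range(i) if m1[j] == c and m1[j] != m2[j])
--         return 2 if rank < m2.count(c) else 0
--     return [code(i) for i in range(len(m1))]
-- ===== Notes on version B (the rewrite author's own statement) =====
-- stated objective: alternative
-- what changed: Replaces A's stateful consumption pool (a mutable copy of m2 with membership test and remove) by a stateless per-position rule: a non-exact position gets 2 iff its rank among earlier non-exact occurrences of the same letter of m1 is below m2's total count of that letter.
import Mathlib
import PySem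

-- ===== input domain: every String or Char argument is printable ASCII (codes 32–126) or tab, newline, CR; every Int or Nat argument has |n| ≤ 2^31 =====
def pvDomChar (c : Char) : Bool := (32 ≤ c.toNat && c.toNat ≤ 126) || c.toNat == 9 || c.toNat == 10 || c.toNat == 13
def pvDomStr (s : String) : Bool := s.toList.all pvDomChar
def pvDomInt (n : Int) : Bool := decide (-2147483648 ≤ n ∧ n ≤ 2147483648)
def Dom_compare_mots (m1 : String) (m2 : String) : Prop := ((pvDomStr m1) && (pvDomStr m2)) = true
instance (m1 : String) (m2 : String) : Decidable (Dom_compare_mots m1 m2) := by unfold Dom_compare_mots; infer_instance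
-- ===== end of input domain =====

-- B replaces A's mutable consumption pool by a stateless per-position rank rule (alternative decomposition, same cost).

-- ===== PORT A =====
-- loop body of A: state (profil, m2l_c); index i is always in range, so getD is exact
def pvStepA (m1l m2l : List Char) (st : List Int × List Char) (i : Nat) : List Int × List Char :=
  if m1l.getD i ' ' == m2l.getD i ' ' then (st.1.set i 1, st.2)
  else if m1l.getD i ' ' ∈ st.2 then (st.1.set i 2, st.2.erase (m1l.getD i ' '))  -- list.remove of a present element = erase first occurrence
  else (st.1.set i 0, st.2)

def compare_mots (m1 : String) (m2 : String) : Option (List Int) :=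
  if m1.toList.length ≠ m2.toList.length then none  -- bare `return` = None
  else
    let m1l := m1.toList
    let m2l := m2.toList
    -- profil = [0]*len(m1); m2l_c = list(m2); for i in range(len(m1l)): …
    let r := (List.range m1l.length).foldl (pvStepA m1l m2l) (List.replicate m1l.length 0, m2.toList)
    some r.1

-- ===== PORT B =====
-- rank = sum(1 for j in range(i) if m1[j] == c and m1[j] != m2[j])
def pvRank (m1l m2l : List Char) (i : Nat) (c : Char) : Nat :=
  ((List.range i).filter (fun j => m1l.getD j ' ' == c && !(m1l.getD j ' ' == m2l.getD j ' '))).length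

def compare_mots_alt (m1 : String) (m2 : String) : Option (List Int) :=
  let l1 := m1.toList
  let l2 := m2.toList
  if l1.length ≠ l2.length then none
  else
    some ((List.range l1.length).map (fun i =>
      let c := l1.getD i ' '
      if c == l2.getD i ' ' then (1 : Int)
      else if pvRank l1 l2 i c < l2.count c then 2 else 0))

-- ===== PRECONDITION & SPEC =====
def Spec_compare_mots (m1 : String) (m2 : String) (out : Option (List Int)) : Prop := out = compare_mots_alt m1 m2
instance (m1 : String) (m2 : String) (out : Option (List Int)) : Decidable (Spec_compare_mots m1 m2 out) := by unfold Spec_compare_mots; infer_instance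

-- ===== CLAIM (what is proved, stated in full; the proofs are below) =====
def Claim_equal_compare_mots : Prop := ∀ (m1 : String) (m2 : String), Dom_compare_mots m1 m2 → Spec_compare_mots m1 m2 (compare_mots m1 m2)

-- ===== LEMMAS AND PROOFS =====

-- the per-position value both programs compute
def pvF (l1 l2 : List Char) (i : Nat) : Int :=
  if l1.getD i ' ' == l2.getD i ' ' then 1
  else if pvRank l1 l2 i (l1.getD i ' ') < l2.count (l1.getD i ' ') then 2 else 0

lemma pvRank_succ (l1 l2 : List Char) (k : Nat) (c : Char) :
    pvRank l1 l2 (k+1) c =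
      pvRank l1 l2 k c + (if l1.getD k ' ' == c && !(l1.getD k ' ' == l2.getD k ' ') then 1 else 0) := by
  simp only [pvRank, List.range_succ, List.filter_append, List.length_append, List.filter_cons,
    List.filter_nil]
  split_ifs <;> simp_all

lemma getD_set_self (l : List Int) (i : Nat) (v : Int) (h : i < l.length) :
    (l.set i v).getD i 0 = v := by
  simp [List.getD, List.getElem?_set, h]

lemma getD_set_ne (l : List Int) {i j : Nat} (v : Int) (h : i ≠ j) :
    (l.set i v).getD j 0 = l.getD j 0 := by
  simp [List.getD, List.getElem?_set, h]

-- loop invariant for A: the pool's letter counts determine the whole behaviour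
lemma loopA (l1 l2 : List Char) :
    ∀ (m k : Nat) (profil : List Int) (pool : List Char),
    k + m ≤ l1.length →
    profil.length = l1.length →
    (∀ c, pool.count c = l2.count c - pvRank l1 l2 k c) →
    (((List.range' k m).foldl (pvStepA l1 l2) (profil, pool)).1.length = l1.length ∧
     ∀ j, ((List.range' k m).foldl (pvStepA l1 l2) (profil, pool)).1.getD j 0 =
       if k ≤ j ∧ j < k + m then pvF l1 l2 j else profil.getD j 0) := by
  intro m
  induction m with
  | zero =>
      intro k profil pool _ hlen _
      rw [show List.range' k 0 = [] from rfl, List.foldl_nil]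
      exact ⟨hlen, fun j => by rw [if_neg (by omega)]⟩
  | succ m ih =>
      intro k profil pool hkm hlen hpool
      have hk : k < l1.length := by omega
      rw [List.range'_succ, List.foldl_cons]
      set st' := pvStepA l1 l2 (profil, pool) k with hst'
      have hstep : st'.1.getD k 0 = pvF l1 l2 k ∧ st'.1.length = l1.length ∧
          (∀ j, j ≠ k → st'.1.getD j 0 = profil.getD j 0) ∧
          (∀ c, st'.2.count c = l2.count c - pvRank l1 l2 (k+1) c) := by
        have hklt : k < profil.length := hlen ▸ hk
        by_cases heq : l1.getD k ' ' == l2.getD k ' '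
        · have : st' = (profil.set k 1, pool) := by
            rw [hst']; unfold pvStepA; rw [if_pos heq]
          refine this ▸ ⟨?_, by simp [hlen], fun j hj => getD_set_ne _ _ (Ne.symm hj), fun c => ?_⟩
          · rw [getD_set_self _ _ _ hklt, pvF, if_pos heq]
          · have hb : (l1.getD k ' ' == c && !(l1.getD k ' ' == l2.getD k ' ')) = false := by
              rw [heq]; simp
            rw [pvRank_succ, hb]
            simp [hpool c]
        · by_cases hmem : l1.getD k ' ' ∈ pool
          · have : st' = (profil.set k 2, pool.erase (l1.getD k ' ')) := by
              rw [hst']; unfold pvStepA; rw [if_neg heq, if_pos hmem]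
            have hpos : 0 < pool.count (l1.getD k ' ') := List.count_pos_iff.mpr hmem
            have hrank : pvRank l1 l2 k (l1.getD k ' ') < l2.count (l1.getD k ' ') := by
              have := hpool (l1.getD k ' '); omega
            refine this ▸ ⟨?_, by simp [hlen], fun j hj => getD_set_ne _ _ (Ne.symm hj), fun c => ?_⟩
            · rw [getD_set_self _ _ _ hklt, pvF, if_neg heq, if_pos hrank]
            · by_cases hc : c = l1.getD k ' '
              · subst hc
                have hbe : (l1.getD k ' ' == l2.getD k ' ') = false := by
                  cases h' : (l1.getD k ' ' == l2.getD k ' ') <;> simp_all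
                have hb : (l1.getD k ' ' == l1.getD k ' ' && !(l1.getD k ' ' == l2.getD k ' ')) = true := by
                  rw [hbe]; simp
                have h2 : pvRank l1 l2 (k+1) (l1.getD k ' ') = pvRank l1 l2 k (l1.getD k ' ') + 1 := by
                  rw [pvRank_succ, hb]; simp
                rw [List.count_erase_self, h2]
                have := hpool (l1.getD k ' ')
                omega
              · have hne : (l1.getD k ' ' == c) = false := by
                  cases h' : (l1.getD k ' ' == c)
                  · rfl
                  · exact absurd (eq_of_beq h').symm hc
                have hb : (l1.getD k ' ' == c && !(l1.getD k ' ' == l2.getD k ' ')) = false := by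
                  rw [hne]; simp
                rw [List.count_erase_of_ne hc, pvRank_succ, hb]
                simp [hpool c]
          · have : st' = (profil.set k 0, pool) := by
              rw [hst']; unfold pvStepA; rw [if_neg heq, if_neg hmem]
            have hzero : pool.count (l1.getD k ' ') = 0 :=
              Nat.eq_zero_of_not_pos (fun h => hmem (List.count_pos_iff.mp h))
            have hrank : ¬ pvRank l1 l2 k (l1.getD k ' ') < l2.count (l1.getD k ' ') := by
              have := hpool (l1.getD k ' '); omega
            refine this ▸ ⟨?_, by simp [hlen], fun j hj => getD_set_ne _ _ (Ne.symm hj), fun c => ?_⟩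
            · rw [getD_set_self _ _ _ hklt, pvF, if_neg heq, if_neg hrank]
            · by_cases hc : c = l1.getD k ' '
              · subst hc
                have hbe : (l1.getD k ' ' == l2.getD k ' ') = false := by
                  cases h' : (l1.getD k ' ' == l2.getD k ' ') <;> simp_all
                have hb : (l1.getD k ' ' == l1.getD k ' ' && !(l1.getD k ' ' == l2.getD k ' ')) = true := by
                  rw [hbe]; simp
                have h2 : pvRank l1 l2 (k+1) (l1.getD k ' ') = pvRank l1 l2 k (l1.getD k ' ') + 1 := by
                  rw [pvRank_succ, hb]; simp
                have h0 := hpool (l1.getD k ' ')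
                show List.count (l1.getD k ' ') pool = _
                rw [h2]
                omega
              · have hne : (l1.getD k ' ' == c) = false := by
                  cases h' : (l1.getD k ' ' == c)
                  · rfl
                  · exact absurd (eq_of_beq h').symm hc
                have hb : (l1.getD k ' ' == c && !(l1.getD k ' ' == l2.getD k ' ')) = false := by
                  rw [hne]; simp
                rw [pvRank_succ, hb]
                simp [hpool c]
      obtain ⟨hstk, hstlen, hstne, hstpool⟩ := hstep
      obtain ⟨ihlen, ihget⟩ := ih (k+1) st'.1 st'.2 (by omega) hstlen hstpool
      have hfold : (List.range' (k+1) m).foldl (pvStepA l1 l2) st' =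
          (List.range' (k+1) m).foldl (pvStepA l1 l2) (st'.1, st'.2) := by rfl
      rw [hfold]
      refine ⟨ihlen, fun j => ?_⟩
      rw [ihget j]
      by_cases hj1 : k+1 ≤ j ∧ j < k+1+m
      · rw [if_pos hj1, if_pos (by omega)]
      · rw [if_neg hj1]
        by_cases hj2 : j = k
        · subst hj2
          rw [hstk, if_pos (by omega)]
        · rw [hstne j hj2, if_neg (by omega)]

theorem compare_mots_spec : Claim_equal_compare_mots := by
  intro m1 m2 _
  unfold Spec_compare_mots compare_mots compare_mots_alt
  by_cases h : m1.toList.length = m2.toList.length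
  · have hx : ¬ m1.toList.length ≠ m2.toList.length := fun hne => hne h
    simp only [if_neg hx]
    obtain ⟨hlen, hget⟩ := loopA m1.toList m2.toList m1.toList.length 0
      (List.replicate m1.toList.length 0) m2.toList (by omega) (by simp)
      (by intro c; simp [pvRank])
    rw [List.range_eq_range']
    congr 1
    refine List.ext_getElem (by simpa using hlen) (fun j hj1 hj2 => ?_)
    have hj : j < m1.toList.length := by rw [hlen] at hj1; exact hj1
    have h1 := hget j
    rw [if_pos ⟨Nat.zero_le j, by omega⟩] at h1
    rw [← List.getD_eq_getElem _ 0 hj1, h1]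
    simp [pvF]
  · have h' : m1.length ≠ m2.length := by simpa using h
    simp [h']
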